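-- pv_equiv track=rewrite | github.com/GGlinsek/programiranje-1 | Specops.py | razporedi
-- ===== SOURCE A (Python) =====
-- def koraki(x, y, pot):
--     pot = list(pot)
--     pot_po_korakih = [(x, y)]
--     for korak in pot:
--         if korak == "v":
--             y += 1
--         elif korak == "^":
--             y -= 1
--         elif korak == ">":
--             x += 1
--         elif korak == "<":
--             x -= 1
--         pot_po_korakih.append((x, y))
--     return pot_po_korakih
--
-- def razporedi(specialci, marsovci):
--     najdalsa_pot = max([len(pot) for (x, y, pot) in specialci + marsovci] + [0])
--     poti = [[], []]
--     if najdalsa_pot > 0: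
--         a = list(zip(*list(koraki(x, y, f"{pot:{najdalsa_pot}}") for x, y, pot in specialci)))
--         b = list(zip(*list(koraki(x, y, f"{pot:{najdalsa_pot}}") for x, y, pot in marsovci)))
--     elif najdalsa_pot == 0:
--         a = list(zip(*list(koraki(x, y, pot) for x, y, pot in specialci)))
--         b = list(zip(*list(koraki(x, y, pot) for x, y, pot in marsovci)))
--     for item in a:
--         poti[0].append(list(item))
--     for item in b:
--         poti[1].append(list(item))
--     return tuple(poti)
-- ===== SOURCE B (Python) =====
-- def razporedi(specialci, marsovci):
--     n = max([len(pot) for (_x, _y, pot) in specialci + marsovci] + [0])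
--     delta = {"v": (0, 1), "^": (0, -1), ">": (1, 0), "<": (-1, 0)}
--
--     def skupina(entitete):
--         if not entitete:
--             return []
--         cur = [(x, y) for (x, y, _pot) in entitete]
--         snapshots = [list(cur)]
--         for t in range(n):
--             nxt = []
--             for (x, y), (_x0, _y0, pot) in zip(cur, entitete):
--                 if t < len(pot):
--                     dx, dy = delta.get(pot[t], (0, 0))
--                     x, y = x + dx, y + dy
--                 nxt.append((x, y))
--             cur = nxt
--             snapshots.append(cur)
--         return snapshots
--
--     return (skupina(specialci), skupina(marsovci))
-- ===== Notes on version B (the rewrite author's own statement) =====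
-- stated objective: alternative
-- what changed: Replaces A's per-entity koraki trajectory lists on space-padded paths plus a zip(*) transpose by a time-major simulation: one loop over time steps that advances a maintained current-position list in place (no padding, no transpose).
import Mathlib
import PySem

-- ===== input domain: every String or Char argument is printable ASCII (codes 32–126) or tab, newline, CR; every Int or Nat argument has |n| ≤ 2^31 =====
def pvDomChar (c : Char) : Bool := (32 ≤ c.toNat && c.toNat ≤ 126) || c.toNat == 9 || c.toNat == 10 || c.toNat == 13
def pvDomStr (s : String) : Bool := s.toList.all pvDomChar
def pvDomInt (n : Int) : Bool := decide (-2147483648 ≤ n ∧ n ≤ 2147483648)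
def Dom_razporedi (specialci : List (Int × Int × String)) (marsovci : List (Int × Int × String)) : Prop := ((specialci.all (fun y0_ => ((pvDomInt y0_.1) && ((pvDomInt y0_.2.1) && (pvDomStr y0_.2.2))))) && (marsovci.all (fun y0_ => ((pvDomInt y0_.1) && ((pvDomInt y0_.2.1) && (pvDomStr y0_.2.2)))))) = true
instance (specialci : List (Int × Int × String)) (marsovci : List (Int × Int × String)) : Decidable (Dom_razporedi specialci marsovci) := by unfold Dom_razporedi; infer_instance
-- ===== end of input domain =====

-- B replaces A's per-entity koraki lists + zip-transpose by a time-major simulation that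
-- advances all current positions step by step (objective: alternative decomposition; return value only).

-- ===== PORT A =====
-- one step of koraki's if-chain
def korakiStep (x y : Int) (c : Char) : Int × Int :=
  if c = 'v' then (x, y + 1)
  else if c = '^' then (x, y - 1)
  else if c = '>' then (x + 1, y)
  else if c = '<' then (x - 1, y)
  else (x, y)

-- koraki: positions before and after each character of the path
def koraki (x y : Int) : List Char → List (Int × Int)
  | [] => [(x, y)]
  | c :: rest => (x, y) :: koraki (korakiStep x y c).1 (korakiStep x y c).2 rest

-- list(zip(*ls)): transpose truncating to the shortest row (zip of no iterables is empty)
def zipStar (ls : List (List (Int × Int))) : List (List (Int × Int)) :=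
  match ls with
  | [] => []
  | l0 :: rest =>
    let m := rest.foldl (fun m l => min m l.length) l0.length
    (List.range m).map (fun t => ls.map (fun l => l.getD t (0, 0)))

-- max([len(pot) for ...] + [0])
def pyMaxLen (s m : List (Int × Int × String)) : Nat :=
  (((s ++ m).map (fun e : Int × Int × String => e.2.2.toList.length)) ++ [0]).foldl Nat.max 0

-- f"{pot:{n}}": left-justified space padding to width n
def padTo (n : Nat) (s : String) : List Char :=
  s.toList ++ List.replicate (n - s.toList.length) ' '

def razporedi (specialci : List (Int × Int × String)) (marsovci : List (Int × Int × String)) : List (List (List (Int × Int))) :=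
  let n := pyMaxLen specialci marsovci
  let a := if n > 0 then zipStar (specialci.map (fun e => koraki e.1 e.2.1 (padTo n e.2.2)))
           else zipStar (specialci.map (fun e => koraki e.1 e.2.1 e.2.2.toList))
  let b := if n > 0 then zipStar (marsovci.map (fun e => koraki e.1 e.2.1 (padTo n e.2.2)))
           else zipStar (marsovci.map (fun e => koraki e.1 e.2.1 e.2.2.toList))
  [a, b]

-- ===== PORT B =====
-- delta.get(c, (0,0))
def delta (c : Char) : Int × Int :=
  if c = 'v' then (0, 1)
  else if c = '^' then (0, -1)
  else if c = '>' then (1, 0)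
  else if c = '<' then (-1, 0)
  else (0, 0)

-- body of B's inner comprehension: advance one (position, entity) pair at time t
def premakni (t : Nat) (pe : (Int × Int) × (Int × Int × String)) : Int × Int :=
  if t < pe.2.2.2.toList.length then
    (pe.1.1 + (delta (pe.2.2.2.toList.getD t ' ')).1,
     pe.1.2 + (delta (pe.2.2.2.toList.getD t ' ')).2)
  else pe.1

-- one iteration of B's time loop: compute the next snapshot and append it
def korakSkupine (ents : List (Int × Int × String)) (acc : List (List (Int × Int)) × List (Int × Int)) (t : Nat) : List (List (Int × Int)) × List (Int × Int) :=
  let nxt := (acc.2.zip ents).map (premakni t)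
  (acc.1 ++ [nxt], nxt)

-- B's skupina: time-major loop maintaining the current positions
def skupina (n : Nat) (ents : List (Int × Int × String)) : List (List (Int × Int)) :=
  match ents with
  | [] => []
  | _ :: _ =>
    let cur0 := ents.map (fun e => (e.1, e.2.1))
    ((List.range n).foldl (korakSkupine ents) ([cur0], cur0)).1

def razporedi_alt (specialci : List (Int × Int × String)) (marsovci : List (Int × Int × String)) : List (List (List (Int × Int))) :=
  let n := pyMaxLen specialci marsovci
  [skupina n specialci, skupina n marsovci]

-- ===== PRECONDITION & SPEC =====
def Spec_razporedi (specialci : List (Int × Int × String)) (marsovci : List (Int × Int × String)) (out : List (List (List (Int × Int)))) : Prop := out = razporedi_alt specialci marsovci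
instance (specialci : List (Int × Int × String)) (marsovci : List (Int × Int × String)) (out : List (List (List (Int × Int)))) : Decidable (Spec_razporedi specialci marsovci out) := by unfold Spec_razporedi; infer_instance

-- ===== CLAIM (what is proved, stated in full; the proofs are below) =====
def Claim_equal_razporedi : Prop := ∀ (specialci : List (Int × Int × String)) (marsovci : List (Int × Int × String)), Dom_razporedi specialci marsovci → Spec_razporedi specialci marsovci (razporedi specialci marsovci)

-- ===== LEMMAS AND PROOFS =====

-- position after applying the first t characters of a path
def applyD (p : Int × Int) (c : Char) : Int × Int := (p.1 + (delta c).1, p.2 + (delta c).2)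

def walk (p : Int × Int) (cs : List Char) : Int × Int := cs.foldl applyD p

-- the common closed form: snapshot at every time 0..n
def snaps (n : Nat) (g : List (Int × Int × String)) : List (List (Int × Int)) :=
  (List.range (n + 1)).map (fun t => g.map (fun e => walk (e.1, e.2.1) (e.2.2.toList.take t)))

theorem korakiStep_eq (x y : Int) (c : Char) : korakiStep x y c = applyD (x, y) c := by
  unfold korakiStep applyD delta
  split_ifs <;> simp [Int.sub_eq_add_neg]

theorem koraki_eq (cs : List Char) : ∀ x y : Int,
    koraki x y cs = (List.range (cs.length + 1)).map (fun t => walk (x, y) (cs.take t)) := by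
  induction cs with
  | nil => intro x y; simp [koraki, walk]
  | cons c rest ih =>
    intro x y
    have h1 : List.range (rest.length + 1 + 1) = 0 :: (List.range (rest.length + 1)).map Nat.succ :=
      List.range_succ_eq_map
    simp only [koraki, List.length_cons, h1, List.map_cons, List.map_map]
    congr 1
    rw [ih]
    apply List.map_congr_left
    intro t _
    simp [Function.comp_apply, List.take_succ_cons, walk, korakiStep_eq]

theorem walk_append (p : Int × Int) (l1 l2 : List Char) :
    walk p (l1 ++ l2) = walk (walk p l1) l2 := List.foldl_append

theorem walk_spaces (k : Nat) : ∀ p : Int × Int, walk p (List.replicate k ' ') = p := by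
  induction k with
  | zero => intro p; rfl
  | succ k ih =>
    intro p
    simp only [List.replicate_succ, walk, List.foldl_cons]
    have : applyD p ' ' = p := by simp [applyD, delta]
    rw [this]; exact ih p

theorem walk_pad_take (p : Int × Int) (cs : List Char) (j t : Nat) :
    walk p ((cs ++ List.replicate j ' ').take t) = walk p (cs.take t) := by
  rw [List.take_append, List.take_replicate, walk_append, walk_spaces]

theorem foldl_min_const (k : Nat) : ∀ (l : List (List (Int × Int))),
    (∀ x ∈ l, x.length = k) → l.foldl (fun m l => min m l.length) k = k := by
  intro l
  induction l with
  | nil => intro _; rfl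
  | cons a l ih =>
    intro h
    simp only [List.foldl_cons, h a (by simp), Nat.min_self]
    exact ih (fun x hx => h x (by simp [hx]))

theorem zipStar_const {g : List (Int × Int × String)} {f : Int × Int × String → List (Int × Int)}
    (n : Nat) (hne : g ≠ []) (hlen : ∀ e ∈ g, (f e).length = n + 1) :
    zipStar (g.map f) =
      (List.range (n + 1)).map (fun t => g.map (fun e => (f e).getD t (0, 0))) := by
  obtain ⟨e0, g', rfl⟩ := List.exists_cons_of_ne_nil hne
  simp only [zipStar, List.map_cons]
  rw [hlen e0 (by simp)]
  rw [foldl_min_const _ _ (fun x hx => by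
    obtain ⟨e, he, rfl⟩ := List.mem_map.mp hx
    exact hlen e (by simp [he]))]
  simp [List.map_map]

theorem take_succ_eq (cs : List Char) (k : Nat) (hk : k < cs.length) :
    cs.take (k + 1) = cs.take k ++ [cs.getD k ' '] := by
  rw [List.take_add_one]
  simp [List.getElem?_eq_getElem hk, List.getD_eq_getElem?_getD]

-- A-side group in closed form (padded branch)
theorem Agroup_pad (n : Nat) (g : List (Int × Int × String))
    (hlen : ∀ e ∈ g, e.2.2.toList.length ≤ n) :
    zipStar (g.map (fun e => koraki e.1 e.2.1 (padTo n e.2.2))) =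
      if g = [] then [] else snaps n g := by
  by_cases hg : g = []
  · subst hg; simp [zipStar]
  · rw [if_neg hg]
    have hlenpad : ∀ e ∈ g, (koraki e.1 e.2.1 (padTo n e.2.2)).length = n + 1 := by
      intro e he
      rw [koraki_eq]
      have : (padTo n e.2.2).length = n := by
        simp only [padTo, List.length_append, List.length_replicate]
        have := hlen e he; omega
      simp [this]
    rw [zipStar_const n hg hlenpad]
    unfold snaps
    apply List.map_congr_left
    intro t ht
    have ht' : t < n + 1 := List.mem_range.mp ht
    apply List.map_congr_left
    intro e he
    rw [koraki_eq]
    have hpl : (padTo n e.2.2).length = n := by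
      simp only [padTo, List.length_append, List.length_replicate]
      have := hlen e he; omega
    have : ((List.range ((padTo n e.2.2).length + 1)).map
        (fun t => walk (e.1, e.2.1) ((padTo n e.2.2).take t))).getD t (0, 0)
        = walk (e.1, e.2.1) ((padTo n e.2.2).take t) := by
      rw [List.getD_eq_getElem?_getD]
      simp [hpl, ht']
    rw [this]
    exact walk_pad_take _ _ _ _

-- A-side group, n = 0 branch (all paths are empty)
theorem Agroup_zero (g : List (Int × Int × String))
    (hlen : ∀ e ∈ g, e.2.2.toList.length ≤ 0) :
    zipStar (g.map (fun e => koraki e.1 e.2.1 e.2.2.toList)) =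
      if g = [] then [] else snaps 0 g := by
  by_cases hg : g = []
  · subst hg; simp [zipStar]
  · rw [if_neg hg]
    have hemp : ∀ e ∈ g, e.2.2.toList = [] := by
      intro e he; exact List.eq_nil_of_length_eq_zero (Nat.le_zero.mp (hlen e he))
    have hl1 : ∀ e ∈ g, (koraki e.1 e.2.1 e.2.2.toList).length = 0 + 1 := by
      intro e he; rw [hemp e he]; rfl
    rw [zipStar_const 0 hg hl1]
    unfold snaps
    apply List.map_congr_left
    intro t ht
    have ht' : t < 1 := List.mem_range.mp ht
    interval_cases t
    apply List.map_congr_left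
    intro e he
    rw [hemp e he]
    rfl

-- B-side loop invariant
theorem skupina_inv (g : List (Int × Int × String)) (k : Nat) :
    (List.range k).foldl (korakSkupine g)
      ([g.map (fun e => (e.1, e.2.1))], g.map (fun e => (e.1, e.2.1))) =
    ((List.range (k + 1)).map (fun t => g.map (fun e => walk (e.1, e.2.1) (e.2.2.toList.take t))),
      g.map (fun e => walk (e.1, e.2.1) (e.2.2.toList.take k))) := by
  induction k with
  | zero => simp [walk]
  | succ k ih =>
    rw [List.range_succ, List.foldl_append, ih]
    simp only [List.foldl_cons, List.foldl_nil, korakSkupine]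
    have hzip : (g.map (fun e => walk (e.1, e.2.1) (e.2.2.toList.take k))).zip g
        = g.map (fun e => (walk (e.1, e.2.1) (e.2.2.toList.take k), e)) := by
      simpa using List.zip_map' (f := fun e : Int × Int × String => walk (e.1, e.2.1) (e.2.2.toList.take k)) (g := id) (l := g)
    have hstep : ∀ e : Int × Int × String,
        premakni k (walk (e.1, e.2.1) (e.2.2.toList.take k), e)
          = walk (e.1, e.2.1) (e.2.2.toList.take (k + 1)) := by
      intro e
      by_cases hk : k < e.2.2.toList.length
      · rw [take_succ_eq _ _ hk, walk_append]
        unfold premakni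
        rw [if_pos hk]
        rfl
      · have ht : e.2.2.toList.take (k + 1) = e.2.2.toList.take k := by
          rw [List.take_of_length_le (by omega), List.take_of_length_le (by omega)]
        rw [ht]
        unfold premakni
        rw [if_neg hk]
    simp only [Prod.mk.injEq]
    constructor
    · rw [List.range_succ (n := k + 1), List.map_append]
      congr 1
      simp only [hzip, List.map_map, List.map_cons, List.map_nil]
      congr 1
      exact List.map_congr_left (fun e _ => hstep e)
    · rw [hzip, List.map_map]
      exact List.map_congr_left (fun e _ => hstep e)

theorem skupina_eq (n : Nat) (g : List (Int × Int × String)) :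
    skupina n g = if g = [] then [] else snaps n g := by
  cases g with
  | nil => rfl
  | cons e0 g' =>
    rw [if_neg (by simp)]
    show ((List.range n).foldl (korakSkupine (e0 :: g'))
        ([(e0 :: g').map (fun e => (e.1, e.2.1))], (e0 :: g').map (fun e => (e.1, e.2.1)))).1
      = snaps n (e0 :: g')
    rw [skupina_inv]
    rfl

theorem path_le_max (s m : List (Int × Int × String)) :
    ∀ e ∈ s ++ m, e.2.2.toList.length ≤ pyMaxLen s m := by
  intro e he
  unfold pyMaxLen
  have := (PySem.List.le_foldl_max ((((s ++ m).map (fun e : Int × Int × String => e.2.2.toList.length)) ++ [0])) 0).2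
  exact this _ (by simp only [List.mem_append]; exact Or.inl (List.mem_map.mpr ⟨e, he, rfl⟩))

-- ===== VERDICT (by name: the statement is the Claim_ definition above) =====
theorem razporedi_spec : Claim_equal_razporedi := by
  intro s m _
  unfold Spec_razporedi razporedi razporedi_alt
  have hs := fun e he => path_le_max s m e (List.mem_append.mpr (Or.inl he))
  have hm := fun e he => path_le_max s m e (List.mem_append.mpr (Or.inr he))
  by_cases hn : pyMaxLen s m > 0
  · simp only [if_pos hn]
    rw [Agroup_pad _ _ hs, Agroup_pad _ _ hm, skupina_eq, skupina_eq]
  · have h0 : pyMaxLen s m = 0 := by omega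
    simp only [if_neg hn]
    rw [Agroup_zero s (by intro e he; have := hs e he; omega),
      Agroup_zero m (by intro e he; have := hm e he; omega),
      skupina_eq, skupina_eq, h0]
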